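-- pv_equiv track=rewrite | github.com/erellgachon/ProjetCSI | tools.py | MultPolyExt
-- ===== SOURCE A (Python) =====
-- def AddInTore(p,a,b) :
--     return (a+b)%p
--
-- def MultExtTore(p,n,x):
--     if(n>=0):
--         cpt = 0
--         for i in range(n):
--             cpt = AddInTore(p,cpt,x)
--         return cpt
--     return MultExtTore(p,-n,-x)
--
-- def MultPolyExt(q,N,P1,P2) :
--     P = [0]*2*N
--     for i in range(N) :
--         for j in range(N) :
--             tmp = MultExtTore(q,P1[i],P2[j])
--             P[i+j] = AddInTore(q,P[i+j],tmp)
--     for i in range(N) :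
--         P[i] = AddInTore(q,P[i],-P[i+N])
--         if P[i]==0 :
--             P[i]=1
--     return P[:N]
-- ===== SOURCE B (Python) =====
-- def MultPolyExt(q, N, P1, P2):
--     # Gather form: each negacyclic coefficient is computed directly, with one
--     # direct multiplication per term and a single final reduction mod q.
--     res = []
--     for k in range(N):
--         acc = 0
--         for i in range(N):
--             j = k - i
--             if 0 <= j < N:
--                 acc += P1[i] * P2[j]
--             j2 = k + N - i
--             if 0 <= j2 < N:
--                 acc -= P1[i] * P2[j2]
--         acc %= q
--         res.append(acc if acc else 1)
--     return res
-- ===== Notes on version B (the rewrite author's own statement) =====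
-- stated objective: faster
-- what changed: Replaces the scatter-into-a-2N-array-then-fold structure (with products computed by repeated addition, O(|coefficient|) each) by a gather: each of the N negacyclic coefficients is accumulated directly with built-in multiplication and reduced mod q once, so the intermediate 2N product array and the repeated-addition multiplication disappear.
import Mathlib
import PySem

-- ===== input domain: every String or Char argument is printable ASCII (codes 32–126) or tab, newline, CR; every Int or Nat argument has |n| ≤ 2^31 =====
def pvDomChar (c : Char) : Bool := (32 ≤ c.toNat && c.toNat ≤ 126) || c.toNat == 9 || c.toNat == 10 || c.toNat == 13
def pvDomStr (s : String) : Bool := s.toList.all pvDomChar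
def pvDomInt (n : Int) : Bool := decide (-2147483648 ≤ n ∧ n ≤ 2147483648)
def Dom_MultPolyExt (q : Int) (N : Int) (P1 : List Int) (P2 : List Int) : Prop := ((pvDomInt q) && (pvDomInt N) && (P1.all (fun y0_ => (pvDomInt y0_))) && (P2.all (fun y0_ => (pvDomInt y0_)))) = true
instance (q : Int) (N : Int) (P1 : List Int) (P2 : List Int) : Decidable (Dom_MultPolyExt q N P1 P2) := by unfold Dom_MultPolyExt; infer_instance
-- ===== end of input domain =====

-- B replaces A's scatter-into-2N-array with repeated-addition products by a direct
-- gather of each negacyclic coefficient using built-in multiplication (objective: faster).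

-- ===== PORT A =====
def AddInTore (p a b : Int) : Int := PySem.Int.mod (a + b) p

def MultExtTore (p n x : Int) : Int :=
  if 0 ≤ n then
    (PySem.List.pyRange 0 n 1).foldl (fun cpt _ => AddInTore p cpt x) 0
  else
    MultExtTore p (-n) (-x)
termination_by (if 0 ≤ n then 0 else 1)
decreasing_by
  simp only [not_le] at *
  rw [if_pos (by omega : (0:Int) ≤ -n), if_neg (by omega : ¬ (0:Int) ≤ n)]
  omega

def MultPolyExt (q : Int) (N : Int) (P1 : List Int) (P2 : List Int) : List Int :=
  let P0 : List Int := List.replicate (2 * N).toNat 0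
  let Pa := (PySem.List.pyRange 0 N 1).foldl (fun P i =>
      (PySem.List.pyRange 0 N 1).foldl (fun P j =>
        let tmp := MultExtTore q (PySem.List.pyGetD P1 i 0) (PySem.List.pyGetD P2 j 0)
        P.set (i + j).toNat (AddInTore q (PySem.List.pyGetD P (i + j) 0) tmp)) P) P0
  let Pb := (PySem.List.pyRange 0 N 1).foldl (fun P i =>
      let v := AddInTore q (PySem.List.pyGetD P i 0) (-(PySem.List.pyGetD P (i + N) 0))
      P.set i.toNat (if v = 0 then 1 else v)) Pa
  PySem.List.slice Pb none (some N)

-- ===== PORT B =====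
def MultPolyExt_alt (q : Int) (N : Int) (P1 : List Int) (P2 : List Int) : List Int :=
  (PySem.List.pyRange 0 N 1).foldl (fun res k =>
    let acc := (PySem.List.pyRange 0 N 1).foldl (fun acc i =>
      let acc := if 0 ≤ k - i ∧ k - i < N then
          acc + PySem.List.pyGetD P1 i 0 * PySem.List.pyGetD P2 (k - i) 0 else acc
      if 0 ≤ k + N - i ∧ k + N - i < N then
          acc - PySem.List.pyGetD P1 i 0 * PySem.List.pyGetD P2 (k + N - i) 0 else acc) 0
    let acc := PySem.Int.mod acc q
    res ++ [if acc = 0 then 1 else acc]) []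

-- ===== PRECONDITION & SPEC =====
-- Pre_: when N > 0, Python A raises ZeroDivisionError if q = 0 and IndexError if N
-- exceeds the length of P1 or P2; exactly those inputs are excluded (for N ≤ 0 the
-- loops never run and A returns [] whatever q and the lists are).
def Pre_MultPolyExt (q : Int) (N : Int) (P1 : List Int) (P2 : List Int) : Prop :=
  N ≤ 0 ∨ (q ≠ 0 ∧ N ≤ (P1.length : Int) ∧ N ≤ (P2.length : Int))
instance (q : Int) (N : Int) (P1 : List Int) (P2 : List Int) : Decidable (Pre_MultPolyExt q N P1 P2) := by unfold Pre_MultPolyExt; infer_instance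

def pvWitness_MultPolyExt : Int × Int × List Int × List Int := (7, 2, [1, 2], [3, 4])

def Spec_MultPolyExt (q : Int) (N : Int) (P1 : List Int) (P2 : List Int) (out : List Int) : Prop := out = MultPolyExt_alt q N P1 P2
instance (q : Int) (N : Int) (P1 : List Int) (P2 : List Int) (out : List Int) : Decidable (Spec_MultPolyExt q N P1 P2 out) := by unfold Spec_MultPolyExt; infer_instance

-- ===== CLAIM (what is proved, stated in full; the proofs are below) =====
def Claim_equal_MultPolyExt : Prop := ∀ (q : Int) (N : Int) (P1 : List Int) (P2 : List Int), Dom_MultPolyExt q N P1 P2 → Pre_MultPolyExt q N P1 P2 → Spec_MultPolyExt q N P1 P2 (MultPolyExt q N P1 P2)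

-- ===== LEMMAS AND PROOFS =====

-- Python % adds/reduces congruently
theorem fmod_add_left (a b q : Int) : (a.fmod q + b).fmod q = (a + b).fmod q := by
  rw [Int.add_fmod, Int.fmod_fmod, ← Int.add_fmod]

theorem fmod_add_right (a b q : Int) : (a + b.fmod q).fmod q = (a + b).fmod q := by
  rw [Int.add_fmod, Int.fmod_fmod, ← Int.add_fmod]

-- the pair list the scatter loop walks
def pvPairs (n : Nat) : List (Nat × Nat) :=
  (List.range n).flatMap (fun i => (List.range n).map (fun j => (i, j)))

-- the sum of products landing at index k
def pvS (P1 P2 : List Int) (n k : Nat) : Int :=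
  (((pvPairs n).filter (fun p => p.1 + p.2 = k)).map
    (fun p => P1.getD p.1 0 * P2.getD p.2 0)).sum

-- the common reference value of both programs
def pvRef (q : Int) (P1 P2 : List Int) (n : Nat) : List Int :=
  (List.range n).map (fun k =>
    let v := (pvS P1 P2 n k - pvS P1 P2 n (k + n)).fmod q
    if v = 0 then 1 else v)

theorem multExtTore_loop (q x a : Int) (l : List Int) :
    l.foldl (fun cpt _ => AddInTore q cpt x) (a.fmod q) = (a + l.length * x).fmod q := by
  induction l generalizing a with
  | nil => simp
  | cons y l ih =>
    rw [List.foldl_cons]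
    have hstep : AddInTore q (a.fmod q) x = (a + x).fmod q := by
      simp only [AddInTore, PySem.Int.mod]
      exact fmod_add_left a x q
    rw [hstep, ih]
    congr 1
    simp only [List.length_cons]
    push_cast
    ring

theorem multExtTore_loop0 (q x : Int) (l : List Int) :
    l.foldl (fun cpt _ => AddInTore q cpt x) 0 = (l.length * x).fmod q := by
  have h := multExtTore_loop q x 0 l
  simpa using h

theorem multExtTore_eq (q n x : Int) : MultExtTore q n x = (n * x).fmod q := by
  by_cases h : 0 ≤ n
  · unfold MultExtTore
    rw [if_pos h]
    rw [multExtTore_loop0, PySem.List.length_pyRange_one]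
    congr 1
    have hc : (((n - 0).toNat : Int)) = n := by omega
    rw [hc]
  · unfold MultExtTore
    rw [if_neg h]
    unfold MultExtTore
    rw [if_pos (by omega : (0:Int) ≤ -n)]
    rw [multExtTore_loop0, PySem.List.length_pyRange_one]
    congr 1
    have hc : (((-n - 0).toNat : Int)) = -n := by omega
    rw [hc]
    ring


-- getD/set helpers
theorem getD_set_self (l : List Int) (k : Nat) (v : Int) (h : k < l.length) :
    (l.set k v).getD k 0 = v := by
  simp [List.getD_eq_getElem?_getD, h]

theorem getD_set_ne (l : List Int) (k m : Nat) (v : Int) (h : m ≠ k) :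
    (l.set m v).getD k 0 = l.getD k 0 := by
  simp [List.getD_eq_getElem?_getD, List.getElem?_set_ne h]

-- nested loop = loop over the pair list
theorem foldl_nested_pairs {γ : Type} (f : γ → Nat × Nat → γ) (l1 l2 : List Nat) (c : γ) :
    l1.foldl (fun c i => l2.foldl (fun c j => f c (i, j)) c) c
      = (l1.flatMap (fun i => l2.map (fun j => (i, j)))).foldl f c := by
  induction l1 generalizing c with
  | nil => rfl
  | cons i l1 ih =>
    simp only [List.foldl_cons, List.flatMap_cons, List.foldl_append, List.foldl_map]
    exact ih _

-- the scatter step of A's first loop, over Nat pairs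
def pvStep (q : Int) (P1 P2 : List Int) (P : List Int) (p : Nat × Nat) : List Int :=
  P.set (p.1 + p.2) ((P.getD (p.1 + p.2) 0 + (P1.getD p.1 0 * P2.getD p.2 0).fmod q).fmod q)

theorem scatter_length (q : Int) (P1 P2 : List Int) (ps : List (Nat × Nat)) (P : List Int) :
    (ps.foldl (pvStep q P1 P2) P).length = P.length := by
  induction ps generalizing P with
  | nil => rfl
  | cons p ps ih => simp only [List.foldl_cons]; rw [ih]; simp [pvStep]

theorem scatter_getD (q : Int) (P1 P2 : List Int) (ps : List (Nat × Nat)) :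
    ∀ (P : List Int) (k : Nat) (c : Int), k < P.length → P.getD k 0 = c.fmod q →
    (ps.foldl (pvStep q P1 P2) P).getD k 0
      = (c + ((ps.filter (fun p => p.1 + p.2 = k)).map
          (fun p => P1.getD p.1 0 * P2.getD p.2 0)).sum).fmod q := by
  induction ps with
  | nil => intro P k c hk hc; simpa using hc
  | cons p ps ih =>
    intro P k c hk hc
    simp only [List.foldl_cons]
    by_cases hpk : p.1 + p.2 = k
    · have hset : (pvStep q P1 P2 P p).getD k 0
          = (c + P1.getD p.1 0 * P2.getD p.2 0).fmod q := by
        rw [pvStep, hpk, getD_set_self _ _ _ hk, hc, fmod_add_left, fmod_add_right]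
      rw [ih (pvStep q P1 P2 P p) k (c + P1.getD p.1 0 * P2.getD p.2 0)
          (by simpa [pvStep] using hk) hset]
      rw [List.filter_cons_of_pos (by simpa using hpk)]
      simp only [List.map_cons, List.sum_cons]
      congr 1
      ring
    · have hset : (pvStep q P1 P2 P p).getD k 0 = c.fmod q := by
        rw [pvStep, getD_set_ne _ _ _ _ hpk, hc]
      rw [ih (pvStep q P1 P2 P p) k c (by simpa [pvStep] using hk) hset]
      rw [List.filter_cons_of_neg (by simpa using hpk)]

-- A's second loop, generically: write g(P[i], P[i+n]) at i for i < m
def pvStep2 (g : Int → Int → Int) (n : Nat) (P : List Int) (i : Nat) : List Int :=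
  P.set i (g (P.getD i 0) (P.getD (i + n) 0))

theorem phase2_getD (g : Int → Int → Int) (n : Nat) :
    ∀ (m : Nat) (P : List Int), m ≤ n → n ≤ P.length →
      ((List.range m).foldl (pvStep2 g n) P).length = P.length ∧
      ∀ k : Nat, ((List.range m).foldl (pvStep2 g n) P).getD k 0
        = if k < m then g (P.getD k 0) (P.getD (k + n) 0) else P.getD k 0 := by
  intro m
  induction m with
  | zero => intro P _ _; exact ⟨rfl, fun k => by simp⟩
  | succ m ih =>
    intro P hm hn
    obtain ⟨ihl, ihd⟩ := ih P (by omega) hn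
    rw [List.range_succ, List.foldl_append, List.foldl_cons, List.foldl_nil]
    have hmlen : m < ((List.range m).foldl (pvStep2 g n) P).length := by rw [ihl]; omega
    constructor
    · simp only [pvStep2, List.length_set]; exact ihl
    · intro k
      by_cases hk : k = m
      · subst hk
        rw [pvStep2, getD_set_self _ _ _ hmlen, ihd k, ihd (k + n)]
        rw [if_neg (by omega), if_neg (by omega), if_pos (by omega)]
      · rw [pvStep2, getD_set_ne _ _ _ _ (fun h => hk h.symm), ihd k]
        by_cases hkm : k < m
        · rw [if_pos hkm, if_pos (by omega)]
        · rw [if_neg hkm, if_neg (by omega)]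

-- rewriting a sum over a filtered list as a sum of an if-map
theorem sum_filter_map_eq (l : List (Nat × Nat)) (pcond : Nat × Nat → Bool) (f : Nat × Nat → Int) :
    ((l.filter pcond).map f).sum = (l.map (fun p => if pcond p then f p else 0)).sum := by
  induction l with
  | nil => rfl
  | cons p l ih =>
    by_cases hp : pcond p
    · rw [List.filter_cons_of_pos hp]; simp [hp, ih]
    · rw [List.filter_cons_of_neg (by simpa using hp)]; simp [hp, ih]

theorem sum_map_sub {α : Type} (l : List α) (f g : α → Int) :
    (l.map (fun x => f x - g x)).sum = (l.map f).sum - (l.map g).sum := by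
  induction l with
  | nil => simp
  | cons x l ih => simp [ih]; ring

-- inner sum of products landing at k, for a fixed i
theorem inner_sum_eq (P1 P2 : List Int) (i k : Nat) (n : Nat) :
    ((List.range n).map (fun j => if i + j = k then P1.getD i 0 * P2.getD j 0 else 0)).sum
      = if i ≤ k ∧ k - i < n then P1.getD i 0 * P2.getD (k - i) 0 else 0 := by
  induction n with
  | zero => simp
  | succ n ih =>
    rw [List.range_succ, List.map_append, List.sum_append, ih]
    simp only [List.map_cons, List.map_nil, List.sum_cons, List.sum_nil]
    by_cases h1 : i + n = k
    · rw [if_pos h1, if_neg (by omega), if_pos (by omega)]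
      have : k - i = n := by omega
      rw [this]; ring
    · rw [if_neg h1]
      by_cases h2 : i ≤ k ∧ k - i < n
      · rw [if_pos h2, if_pos (by omega)]; ring
      · rw [if_neg h2, if_neg (by omega)]; ring

-- pvS as a sum over i of the gathered term
theorem sum_flatMap_eq {α : Type} (l : List α) (f : α → List Int) :
    (l.flatMap f).sum = (l.map (fun x => (f x).sum)).sum := by
  induction l with
  | nil => rfl
  | cons x l ih => simp [ih]

theorem pvS_eq (P1 P2 : List Int) (n k : Nat) :
    pvS P1 P2 n k = ((List.range n).map
      (fun i => if i ≤ k ∧ k - i < n then P1.getD i 0 * P2.getD (k - i) 0 else 0)).sum := by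
  rw [pvS, sum_filter_map_eq, pvPairs]
  rw [List.map_flatMap, sum_flatMap_eq]
  congr 1
  apply List.map_congr_left
  intro i _
  rw [List.map_map, ← inner_sum_eq P1 P2 i k n]
  congr 1
  apply List.map_congr_left
  intro j _
  simp

-- both loops over range N walk (List.range N.toNat).map cast
theorem pyRange_zero_cast (N : Int) :
    PySem.List.pyRange 0 N 1 = (List.range N.toNat).map (fun (k : Nat) => (k : Int)) := by
  rw [PySem.List.pyRange_one]
  have h0 : (N - 0).toNat = N.toNat := by omega
  rw [h0]
  exact List.map_congr_left (fun a _ => by simp)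

theorem fmod_sub_both (a b q : Int) : (a.fmod q + -(b.fmod q)).fmod q = (a - b).fmod q := by
  rw [← sub_eq_add_neg, ← Int.sub_fmod]

-- ===== characterisation of A =====
theorem A_eq_ref (q N : Int) (P1 P2 : List Int) :
    MultPolyExt q N P1 P2 = pvRef q P1 P2 N.toNat := by
  set n := N.toNat with hn
  have hlen2 : (2 * N).toNat = n + n := by omega
  -- phase 1 as a pairs fold
  have hA1 : (PySem.List.pyRange 0 N 1).foldl (fun P i =>
      (PySem.List.pyRange 0 N 1).foldl (fun P j =>
        P.set (i + j).toNat (AddInTore q (PySem.List.pyGetD P (i + j) 0)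
          (MultExtTore q (PySem.List.pyGetD P1 i 0) (PySem.List.pyGetD P2 j 0)))) P) (List.replicate (2 * N).toNat (0:Int))
      = (pvPairs n).foldl (pvStep q P1 P2) (List.replicate (n + n) (0:Int)) := by
    rw [pyRange_zero_cast, hlen2, pvPairs, ← foldl_nested_pairs]
    simp only [List.foldl_map]
    apply PySem.List.foldl_congr_mem _ _ _ _ ?_
    intro P i _
    apply PySem.List.foldl_congr_mem _ _ _ _ ?_
    intro P' j _
    show P'.set ((i:Int) + (j:Int)).toNat _ = _
    have hcast : ((i:Int) + (j:Int)) = ((i + j : Nat) : Int) := by push_cast; ring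
    rw [hcast]
    simp only [PySem.List.pyGetD_natCast, Int.toNat_natCast]
    rw [pvStep, AddInTore, PySem.Int.mod, multExtTore_eq]
  by_cases hN : 0 ≤ N
  case neg =>
    -- N < 0: both sides are empty
    have hn0 : N.toNat = 0 := by omega
    have h20 : (2 * N).toNat = 0 := by omega
    unfold MultPolyExt
    rw [pyRange_zero_cast, hn0, h20]
    simp [PySem.List.slice, pvRef, hn, hn0]
  case pos =>
  have hNn : N = (n : Int) := by omega
  have hPaget : ∀ k : Nat, k < n + n →
      ((pvPairs n).foldl (pvStep q P1 P2) (List.replicate (n + n) (0:Int))).getD k 0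
        = (pvS P1 P2 n k).fmod q := by
    intro k hk
    have h := scatter_getD q P1 P2 (pvPairs n) (List.replicate (n + n) (0:Int)) k 0
      (by simpa using hk) (by simp)
    simpa [pvS] using h
  have hPalen : ((pvPairs n).foldl (pvStep q P1 P2) (List.replicate (n + n) (0:Int))).length
      = n + n := by rw [scatter_length]; simp
  set Pa := (pvPairs n).foldl (pvStep q P1 P2) (List.replicate (n + n) (0:Int)) with hPadef
  -- phase 2 as pvStep2
  have hA2 : (PySem.List.pyRange 0 N 1).foldl (fun P i =>
      P.set i.toNat (if AddInTore q (PySem.List.pyGetD P i 0) (-(PySem.List.pyGetD P (i + N) 0)) = 0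
        then 1 else AddInTore q (PySem.List.pyGetD P i 0) (-(PySem.List.pyGetD P (i + N) 0)))) Pa
      = (List.range n).foldl
          (pvStep2 (fun a b => if (a + -b).fmod q = 0 then 1 else (a + -b).fmod q) n) Pa := by
    rw [pyRange_zero_cast, List.foldl_map]
    apply PySem.List.foldl_congr_mem _ _ _ _ ?_
    intro P i hi
    have hcast : ((i : Int) + N) = ((i + n : Nat) : Int) := by omega
    show P.set ((i:Int)).toNat _ = _
    rw [hcast]
    simp only [PySem.List.pyGetD_natCast, Int.toNat_natCast]
    simp [pvStep2, AddInTore, PySem.Int.mod]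
  -- assemble
  unfold MultPolyExt
  dsimp only
  rw [hA1, hA2]
  obtain ⟨hlen, hget⟩ := phase2_getD
    (fun a b => if (a + -b).fmod q = 0 then 1 else (a + -b).fmod q) n n Pa (le_refl n)
    (by omega)
  set Pb := (List.range n).foldl
      (pvStep2 (fun a b => if (a + -b).fmod q = 0 then 1 else (a + -b).fmod q) n) Pa with hPbdef
  rw [PySem.List.slice_to _ hN]
  have hNt : N.toNat = n := rfl
  rw [hNt]
  apply List.ext_getElem
  · simp [pvRef, hlen, hPalen]
  intro k h1 h2
  have hkn : k < n := by
    have := List.length_take_le n Pb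
    simp [hlen, hPalen] at h1
    omega
  rw [List.getElem_take]
  have hkPb : k < Pb.length := by rw [hlen, hPalen]; omega
  have hgd : Pb[k] = Pb.getD k 0 := by
    rw [List.getD_eq_getElem?_getD, List.getElem?_eq_getElem hkPb]
    rfl
  rw [hgd, hget k, if_pos hkn, hPaget k (by omega), hPaget (k + n) (by omega)]
  simp only [pvRef, List.getElem_map, List.getElem_range]
  simp only [fmod_sub_both]


theorem foldl_add_sum (l : List Nat) (t : Nat → Int) : ∀ (init : Int),
    l.foldl (fun acc i => acc + t i) init = init + (l.map t).sum := by
  induction l with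
  | nil => intro init; simp
  | cons x l ih => intro init; simp [ih]; ring

-- ===== characterisation of B =====
theorem B_eq_ref (q N : Int) (P1 P2 : List Int) :
    MultPolyExt_alt q N P1 P2 = pvRef q P1 P2 N.toNat := by
  set n := N.toNat with hn
  unfold MultPolyExt_alt
  rw [pyRange_zero_cast, List.foldl_map]
  dsimp only
  rw [PySem.List.foldl_append_singleton_eq_map]
  rw [List.nil_append, pvRef]
  apply List.map_congr_left
  intro k hk
  have hkn : k < n := List.mem_range.mp hk
  have hNn : N = (n : Int) := by omega
  have hfold : (List.range n).foldl (fun acc (i : Nat) =>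
      if 0 ≤ (k:Int) + N - (i:Int) ∧ (k:Int) + N - (i:Int) < N then
        (if 0 ≤ (k:Int) - (i:Int) ∧ (k:Int) - (i:Int) < N then
          acc + PySem.List.pyGetD P1 (i:Int) 0 * PySem.List.pyGetD P2 ((k:Int) - (i:Int)) 0 else acc)
          - PySem.List.pyGetD P1 (i:Int) 0 * PySem.List.pyGetD P2 ((k:Int) + N - (i:Int)) 0
      else
        (if 0 ≤ (k:Int) - (i:Int) ∧ (k:Int) - (i:Int) < N then
          acc + PySem.List.pyGetD P1 (i:Int) 0 * PySem.List.pyGetD P2 ((k:Int) - (i:Int)) 0 else acc)) 0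
      = pvS P1 P2 n k - pvS P1 P2 n (k + n) := by
    rw [PySem.List.foldl_congr_mem _ _ (fun acc (i : Nat) => acc +
        ((fun i => if i ≤ k ∧ k - i < n then P1.getD i 0 * P2.getD (k - i) 0 else 0) i
          - (fun i => if i ≤ k + n ∧ k + n - i < n then P1.getD i 0 * P2.getD (k + n - i) 0 else 0) i)) _ ?_]
    · rw [foldl_add_sum, sum_map_sub, ← pvS_eq, ← pvS_eq]
      ring
    · intro acc i hi
      have hin : i < n := List.mem_range.mp hi
      dsimp only
      by_cases c2 : i ≤ k + n ∧ k + n - i < n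
      · have hc2 : 0 ≤ (k:Int) + N - (i:Int) ∧ (k:Int) + N - (i:Int) < N := by omega
        have he2 : (k:Int) + N - (i:Int) = ((k + n - i : Nat) : Int) := by omega
        rw [if_pos hc2, if_pos c2, he2]
        simp only [PySem.List.pyGetD_natCast]
        by_cases c1 : i ≤ k ∧ k - i < n
        · have hc1 : 0 ≤ (k:Int) - (i:Int) ∧ (k:Int) - (i:Int) < N := by omega
          have he1 : (k:Int) - (i:Int) = ((k - i : Nat) : Int) := by omega
          rw [if_pos hc1, if_pos c1, he1]
          simp only [PySem.List.pyGetD_natCast]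
          ring
        · have hc1 : ¬(0 ≤ (k:Int) - (i:Int) ∧ (k:Int) - (i:Int) < N) := by omega
          rw [if_neg hc1, if_neg c1]
          ring
      · have hc2 : ¬(0 ≤ (k:Int) + N - (i:Int) ∧ (k:Int) + N - (i:Int) < N) := by omega
        rw [if_neg hc2, if_neg c2]
        by_cases c1 : i ≤ k ∧ k - i < n
        · have hc1 : 0 ≤ (k:Int) - (i:Int) ∧ (k:Int) - (i:Int) < N := by omega
          have he1 : (k:Int) - (i:Int) = ((k - i : Nat) : Int) := by omega
          rw [if_pos hc1, if_pos c1, he1]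
          simp only [PySem.List.pyGetD_natCast]
          ring
        · have hc1 : ¬(0 ≤ (k:Int) - (i:Int) ∧ (k:Int) - (i:Int) < N) := by omega
          rw [if_neg hc1, if_neg c1]
          ring
  rw [List.foldl_map, hfold]
  rfl

theorem MultPolyExt_spec : Claim_equal_MultPolyExt := by
  intro q N P1 P2 _ _
  unfold Spec_MultPolyExt
  rw [A_eq_ref, B_eq_ref]
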